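-- pv_equiv track=rewrite | github.com/dimtakt/Koromo_Grapher | koromo_review_gui/services.py | _decode_majsoul_paipu_uuid
-- ===== SOURCE A (Python) =====
-- def _decode_majsoul_paipu_uuid(uuid: str) -> str:
--     chars: list[str] = []
--     for index, char in enumerate(uuid):
--         if "0" <= char <= "9":
--             value = ord(char) - ord("0")
--         elif "a" <= char <= "z":
--             value = ord(char) - ord("a") + 10
--         else:
--             chars.append(char)
--             continue
--         value = (value + 55 - index) % 36
--         if value < 10:
--             chars.append(chr(value + ord("0")))
--         else:
--             chars.append(chr(value + ord("a") - 10))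
--     return "".join(chars)
-- ===== SOURCE B (Python) =====
-- ALPHABET = "0123456789abcdefghijklmnopqrstuvwxyz"
-- _TABLES = [str.maketrans(ALPHABET, ALPHABET[s:] + ALPHABET[:s]) for s in range(36)]
--
--
-- def _decode_majsoul_paipu_uuid(uuid: str) -> str:
--     # per-residue blocked decode: the shift only depends on index % 36, so each
--     # strided slice uuid[r::36] is decoded by ONE precomputed translation table
--     out = list(uuid)
--     for r in range(36):
--         out[r::36] = uuid[r::36].translate(_TABLES[(55 - r) % 36])
--     return "".join(out)
-- ===== Notes on version B (the rewrite author's own statement) =====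
-- stated objective: faster
-- what changed: Instead of A's per-character loop with ord() range tests and chr() re-encoding, B observes the shift depends only on index % 36, precomputes 36 rotation translation tables, and for each residue r translates the whole strided slice uuid[r::36] with one str.translate call, scattering the result back by extended-slice assignment.
import Mathlib
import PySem

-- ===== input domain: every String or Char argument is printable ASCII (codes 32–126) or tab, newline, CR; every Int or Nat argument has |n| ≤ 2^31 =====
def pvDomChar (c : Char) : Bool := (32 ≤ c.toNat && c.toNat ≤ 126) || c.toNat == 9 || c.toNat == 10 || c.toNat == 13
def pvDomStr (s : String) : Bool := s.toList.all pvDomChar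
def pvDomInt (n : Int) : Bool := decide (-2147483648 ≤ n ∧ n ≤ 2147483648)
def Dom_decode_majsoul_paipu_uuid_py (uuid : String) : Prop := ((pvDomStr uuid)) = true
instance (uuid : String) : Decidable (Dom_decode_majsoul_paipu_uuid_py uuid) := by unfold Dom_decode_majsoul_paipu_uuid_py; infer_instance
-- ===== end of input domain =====

-- B decodes per residue class mod 36: the shift (55-index)%36 depends only on index%36, so B
-- translates each strided slice uuid[r::36] with one of 36 precomputed rotation tables and
-- scatters it back — a blocked algorithm instead of A's per-character ord()-arithmetic loop.


-- ===== PORT A =====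
-- the common tail of A's two decode branches: `if value < 10: chr(value+48) else: chr(value+87)`
def pvA_emit (value : Int) : Char :=
  if value < 10 then Char.ofNat (value + 48).toNat else Char.ofNat (value + 97 - 10).toNat

-- one iteration of A's `for index, char in enumerate(uuid)` loop over the accumulator `chars`
def pvA_step (acc : List Char) (ic : Int × Char) : List Char :=
  if '0' ≤ ic.2 ∧ ic.2 ≤ '9' then
    acc ++ [pvA_emit (PySem.Int.mod (((ic.2.toNat : Int) - 48) + 55 - ic.1) 36)]
  else if 'a' ≤ ic.2 ∧ ic.2 ≤ 'z' then
    acc ++ [pvA_emit (PySem.Int.mod (((ic.2.toNat : Int) - 97 + 10) + 55 - ic.1) 36)]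
  else
    acc ++ [ic.2]  -- the `else: chars.append(char); continue` branch

def decode_majsoul_paipu_uuid_py (uuid : String) : String :=
  String.mk ((PySem.List.enumerate uuid.toList).foldl pvA_step [])

-- ===== PORT B =====
def pvAlphabet : List Char := "0123456789abcdefghijklmnopqrstuvwxyz".toList

-- hand port of str.maketrans(x, y) for two equal-length strings: {x[i]: y[i]}, left to right — exact here
def pvMaketrans (x y : List Char) : PySem.Dict Char Char :=
  (x.zip y).foldl (fun d p => d.insert p.1 p.2) PySem.Dict.empty

-- _TABLES = [str.maketrans(ALPHABET, ALPHABET[s:] + ALPHABET[:s]) for s in range(36)]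
def pvTables : List (PySem.Dict Char Char) :=
  (List.range 36).map (fun (s : Nat) =>
    pvMaketrans pvAlphabet
      (PySem.List.slice pvAlphabet (some (s : Int)) none ++ PySem.List.slice pvAlphabet none (some (s : Int))))

-- hand port of str.translate(t) for a 1-char→1-char table: chars in the table are replaced, others kept — exact here
def pvTranslate (t : PySem.Dict Char Char) (cs : List Char) : List Char :=
  cs.map (fun c => (t.get? c).getD c)

-- hand port of the extended-slice assignment `out[r::36] = seq` for 0 ≤ r < 36:
-- exact when len(seq) == len(out[r::36]) (Python requires that; the call below guarantees it)
def pvSetSlice36 (out : List Char) (r : Nat) (seq : List Char) : List Char :=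
  out.mapIdx (fun i c => if i % 36 = r then seq.getD ((i - r) / 36) c else c)

-- B's loop body: out[r::36] = uuid[r::36].translate(_TABLES[(55 - r) % 36])
def pvB_step (l : List Char) (out : List Char) (r : Nat) : List Char :=
  match PySem.List.slice? l (some (r : Int)) none 36 with
  | none => out  -- unreachable: the step 36 ≠ 0
  | some sl => pvSetSlice36 out r (pvTranslate (pvTables.getD ((55 - r) % 36) PySem.Dict.empty) sl)

def decode_majsoul_paipu_uuid_py_alt (uuid : String) : String :=
  String.mk ((List.range 36).foldl (pvB_step uuid.toList) uuid.toList)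

-- ===== PRECONDITION & SPEC =====
def Spec_decode_majsoul_paipu_uuid_py (uuid : String) (out : String) : Prop := out = decode_majsoul_paipu_uuid_py_alt uuid
instance (uuid : String) (out : String) : Decidable (Spec_decode_majsoul_paipu_uuid_py uuid out) := by unfold Spec_decode_majsoul_paipu_uuid_py; infer_instance

-- ===== CLAIM (what is proved, stated in full; the proofs are below) =====
def Claim_equal_decode_majsoul_paipu_uuid_py : Prop := ∀ (uuid : String), Dom_decode_majsoul_paipu_uuid_py uuid → Spec_decode_majsoul_paipu_uuid_py uuid (decode_majsoul_paipu_uuid_py uuid)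

-- ===== LEMMAS AND PROOFS =====
-- the pointwise decode both programs compute at index i
def pvF (i : Nat) (c : Char) : Char :=
  if 48 ≤ c.toNat ∧ c.toNat ≤ 57 then pvAlphabet.getD ((c.toNat - 48 + (55 - i % 36) % 36) % 36) ' '
  else if 97 ≤ c.toNat ∧ c.toNat ≤ 122 then pvAlphabet.getD ((c.toNat - 87 + (55 - i % 36) % 36) % 36) ' '
  else c

-- what one iteration of A appends
def pvG (ic : Int × Char) : Char :=
  if '0' ≤ ic.2 ∧ ic.2 ≤ '9' then pvA_emit (PySem.Int.mod (((ic.2.toNat : Int) - 48) + 55 - ic.1) 36)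
  else if 'a' ≤ ic.2 ∧ ic.2 ≤ 'z' then pvA_emit (PySem.Int.mod (((ic.2.toNat : Int) - 97 + 10) + 55 - ic.1) 36)
  else ic.2

-- number of elements of l[r::36]
def pvCnt (n r : Nat) : Nat := (n - r + 35) / 36

theorem pv_char_le_iff (a c : Char) : (a ≤ c) ↔ a.toNat ≤ c.toNat := by
  rw [Char.le_def, UInt32.le_iff_toNat_le]; rfl

theorem pv_emit_getD (k : Nat) (hk : k < 36) : pvA_emit (k : Int) = pvAlphabet.getD k ' ' := by
  interval_cases k <;> decide

-- ---- A-side: A is the pointwise map pvF ----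
theorem pvG_eq_pvF (n : Nat) (c : Char) : pvG ((n : Int), c) = pvF n c := by
  unfold pvG pvF
  simp only [pv_char_le_iff]
  have h0 : ('0' : Char).toNat = 48 := by decide
  have h9 : ('9' : Char).toNat = 57 := by decide
  have ha : ('a' : Char).toNat = 97 := by decide
  have hz : ('z' : Char).toNat = 122 := by decide
  rw [h0, h9, ha, hz]
  split_ifs with hd hl
  · have hmod : PySem.Int.mod (((c.toNat : Int) - 48) + 55 - (n : Int)) 36
        = ((c.toNat - 48 + (55 - n % 36) % 36) % 36 : Nat) := by
      rw [PySem.Int.mod_eq_emod_of_pos (by norm_num)]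
      omega
    rw [hmod, pv_emit_getD _ (by omega)]
  · have hmod : PySem.Int.mod (((c.toNat : Int) - 97 + 10) + 55 - (n : Int)) 36
        = ((c.toNat - 87 + (55 - n % 36) % 36) % 36 : Nat) := by
      rw [PySem.Int.mod_eq_emod_of_pos (by norm_num)]
      omega
    rw [hmod, pv_emit_getD _ (by omega)]
  · rfl

theorem pvA_step_eq : pvA_step = fun acc ic => acc ++ [pvG ic] := by
  funext acc ic
  unfold pvA_step pvG
  split_ifs <;> rfl

theorem pvA_eq_mapIdx (l : List Char) :
    (PySem.List.enumerate l).foldl pvA_step [] = l.mapIdx pvF := by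
  rw [pvA_step_eq, PySem.List.foldl_append_singleton_eq_map, List.nil_append]
  rw [PySem.List.enumerate_eq_zipIdx_map, List.map_map, List.mapIdx_eq_zipIdx_map]
  apply List.map_congr_left
  intro p _
  simp only [Function.comp_apply, zero_add]
  exact pvG_eq_pvF p.2 p.1

-- ---- B-side: the rotation tables looked up pointwise ----
theorem pv_get?_mk_zip (xs ys : List Char) (c : Char) :
    (PySem.Dict.mk (xs.zip ys)).get? c = (PySem.List.index? xs c).bind (fun k => ys[k]?) := by
  induction xs generalizing ys with
  | nil => simp [PySem.List.index?, PySem.Dict.get?]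
  | cons x xs ih =>
    cases ys with
    | nil =>
      simp only [List.zip_nil_right]
      by_cases hx : x = c
      · subst hx; rw [PySem.List.index?_cons_self]; simp [PySem.Dict.get?]
      · rw [PySem.List.index?_cons_of_ne _ hx]
        cases PySem.List.index? xs c <;> simp [PySem.Dict.get?]
    | cons y ys =>
      rw [List.zip_cons_cons, PySem.Dict.get?_mk_cons]
      by_cases hx : x = c
      · subst hx; rw [PySem.List.index?_cons_self]; simp
      · rw [if_neg (by simpa using hx), PySem.List.index?_cons_of_ne _ hx, ih]
        cases PySem.List.index? xs c <;> simp

theorem pv_maketrans_eq (ys : List Char) (h : ys.length = 36) :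
    pvMaketrans pvAlphabet ys = PySem.Dict.mk (pvAlphabet.zip ys) := by
  apply PySem.Dict.ext
  unfold pvMaketrans
  have hnd : (List.map Prod.fst (pvAlphabet.zip ys)).Nodup := by
    rw [List.map_fst_zip (by rw [h]; decide)]
    decide
  rw [PySem.Dict.items_foldl_insert_fresh (l := pvAlphabet.zip ys) (k := Prod.fst) (v := Prod.snd)
      (d := PySem.Dict.empty) (by intro a ha; exact PySem.Dict.contains_empty a.1) hnd]
  simp [PySem.Dict.empty]

theorem pv_alpha_index (c : Char) : PySem.List.index? pvAlphabet c =
    if 48 ≤ c.toNat ∧ c.toNat ≤ 57 then some (c.toNat - 48)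
    else if 97 ≤ c.toNat ∧ c.toNat ≤ 122 then some (c.toNat - 87)
    else none := by
  have hc : c = Char.ofNat c.toNat := (Char.ofNat_toNat c).symm
  by_cases hd : 48 ≤ c.toNat ∧ c.toNat ≤ 57
  · rw [if_pos hd]
    obtain ⟨h1, h2⟩ := hd
    interval_cases h : c.toNat <;> (subst hc; decide)
  · rw [if_neg hd]
    by_cases hl : 97 ≤ c.toNat ∧ c.toNat ≤ 122
    · rw [if_pos hl]
      obtain ⟨h1, h2⟩ := hl
      interval_cases h : c.toNat <;> (subst hc; decide)
    · rw [if_neg hl]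
      rw [PySem.List.index?_eq_none_iff]
      intro hmem
      have : c ∈ pvAlphabet := hmem
      rw [show pvAlphabet = ['0','1','2','3','4','5','6','7','8','9','a','b','c','d','e','f','g','h','i','j','k','l','m','n','o','p','q','r','s','t','u','v','w','x','y','z'] from by decide] at this
      simp only [List.mem_cons, List.not_mem_nil, or_false] at this
      rcases this with h|h|h|h|h|h|h|h|h|h|h|h|h|h|h|h|h|h|h|h|h|h|h|h|h|h|h|h|h|h|h|h|h|h|h|h <;> (subst h; revert hd hl; decide)

theorem pv_rot_getElem? (s k : Nat) (hs : s < 36) (hk : k < 36) :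
    (PySem.List.slice pvAlphabet (some (s : Int)) none ++ PySem.List.slice pvAlphabet none (some (s : Int)))[k]? =
      some (pvAlphabet.getD ((k + s) % 36) ' ') := by
  rw [PySem.List.slice_from_natCast, PySem.List.slice_to_natCast]
  have hlen : pvAlphabet.length = 36 := by decide
  have hdl : (pvAlphabet.drop s).length = 36 - s := by rw [List.length_drop, hlen]
  by_cases hk2 : k < 36 - s
  · rw [List.getElem?_append_left (by omega), List.getElem?_drop]
    have hidx : s + k = (k + s) % 36 := by omega
    rw [hidx, List.getElem?_eq_getElem (by omega), List.getD_eq_getElem _ _ (by omega)]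
  · rw [List.getElem?_append_right (by omega), List.getElem?_take, hdl]
    rw [if_pos (by omega)]
    have hidx : k - (36 - s) = (k + s) % 36 := by omega
    rw [hidx, List.getElem?_eq_getElem (by omega), List.getD_eq_getElem _ _ (by omega)]

theorem pv_table_lookup (s : Nat) (hs : s < 36) (c : Char) :
    (((pvTables.getD s PySem.Dict.empty).get? c).getD c) =
      if 48 ≤ c.toNat ∧ c.toNat ≤ 57 then pvAlphabet.getD ((c.toNat - 48 + s) % 36) ' '
      else if 97 ≤ c.toNat ∧ c.toNat ≤ 122 then pvAlphabet.getD ((c.toNat - 87 + s) % 36) ' '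
      else c := by
  have ht : pvTables.getD s PySem.Dict.empty =
      pvMaketrans pvAlphabet
        (PySem.List.slice pvAlphabet (some (s : Int)) none ++ PySem.List.slice pvAlphabet none (some (s : Int))) := by
    unfold pvTables
    exact PySem.List.getD_map_range _ _ _ _ hs
  have hylen : (PySem.List.slice pvAlphabet (some (s : Int)) none ++ PySem.List.slice pvAlphabet none (some (s : Int))).length = 36 := by
    rw [PySem.List.slice_from_natCast, PySem.List.slice_to_natCast, List.length_append,
      List.length_drop, List.length_take]
    have : pvAlphabet.length = 36 := by decide
    omega
  rw [ht, pv_maketrans_eq _ hylen, pv_get?_mk_zip, pv_alpha_index]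
  split_ifs with hd hl
  · dsimp only [Option.bind]
    rw [pv_rot_getElem? s (c.toNat - 48) hs (by omega), Option.getD_some]
  · dsimp only [Option.bind]
    rw [pv_rot_getElem? s (c.toNat - 87) hs (by omega), Option.getD_some]
  · rfl

-- ---- B-side: the strided slice, element by element ----
theorem pv_filterMap_range_eq_map {β : Type} (f : Nat → Option β) (g : Nat → β) (n : Nat)
    (h : ∀ k < n, f k = some (g k)) : (List.range n).filterMap f = (List.range n).map g := by
  induction n with
  | zero => simp
  | succ m ih =>
    rw [List.range_succ, List.filterMap_append, List.map_append,
      ih (fun k hk => h k (by omega))]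
    simp [h m (by omega)]

theorem pv_slice36 (l : List Char) (r : Nat) :
    PySem.List.slice? l (some (r : Int)) none 36 =
      some ((List.range (pvCnt l.length r)).map (fun k => l.getD (r + 36 * k) ' ')) := by
  unfold PySem.List.slice? PySem.List.sliceIndices
  norm_num
  rw [if_neg (by omega : ¬((r : Int) < 0))]
  by_cases hr : r < l.length
  · rw [min_eq_left (by exact_mod_cast Nat.le_of_lt hr), if_pos (by exact_mod_cast hr)]
    have hcnt : (((l.length : Int) - (r : Int) + 36 - 1) / 36).toNat = pvCnt l.length r := by
      unfold pvCnt; omega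
    rw [hcnt]
    apply pv_filterMap_range_eq_map
    intro k hk
    have hidx : ((r : Int) + 36 * (k : Int)).toNat = r + 36 * k := by omega
    have hlt : r + 36 * k < l.length := by unfold pvCnt at hk; omega
    rw [hidx, List.getElem?_eq_getElem hlt]
    rfl
  · rw [min_eq_right (by exact_mod_cast Nat.le_of_not_lt hr), if_neg (by omega)]
    have hcnt : pvCnt l.length r = 0 := by unfold pvCnt; omega
    rw [hcnt]
    simp

-- ---- B-side loop invariant ----
theorem pv_translate_eq_pvF (m : Nat) (i : Nat) (him : i % 36 = m) (c : Char) :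
    ((pvTables.getD ((55 - m) % 36) PySem.Dict.empty).get? c).getD c = pvF i c := by
  have hs : (55 - m) % 36 < 36 := Nat.mod_lt _ (by norm_num)
  rw [pv_table_lookup _ hs c]
  unfold pvF
  rw [him]

theorem pvB_step_eq (l : List Char) (m : Nat) (hm : m < 36) :
    pvB_step l (l.mapIdx (fun i c => if i % 36 < m then pvF i c else c)) m =
      l.mapIdx (fun i c => if i % 36 < m + 1 then pvF i c else c) := by
  unfold pvB_step
  rw [pv_slice36]
  dsimp only
  unfold pvSetSlice36 pvTranslate
  rw [List.map_map]
  apply List.ext_getElem (by simp)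
  intro i h1 h2
  simp only [List.getElem_mapIdx]
  by_cases him : i % 36 = m
  · have hil : i < l.length := by simpa using h1
    have hj : (i - m) / 36 < pvCnt l.length m := by unfold pvCnt; omega
    rw [if_pos him, List.getD_eq_getElem _ _ (by simpa using hj)]
    simp only [List.getElem_map, List.getElem_range, Function.comp_apply]
    have hidx : m + 36 * ((i - m) / 36) = i := by omega
    rw [hidx, if_pos (show i % 36 < m + 1 by omega), List.getD_eq_getElem _ _ hil]
    exact pv_translate_eq_pvF m i him l[i]
  · rw [if_neg him]
    by_cases hlt : i % 36 < m
    · rw [if_pos hlt, if_pos (by omega)]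
    · rw [if_neg hlt, if_neg (by omega)]

theorem pvB_fold_inv (l : List Char) (m : Nat) (hm : m ≤ 36) :
    (List.range m).foldl (pvB_step l) l = l.mapIdx (fun i c => if i % 36 < m then pvF i c else c) := by
  induction m with
  | zero =>
    simp only [List.range_zero, List.foldl_nil]
    apply List.ext_getElem (by simp)
    intro i h1 h2
    simp [List.getElem_mapIdx]
  | succ k ih =>
    rw [List.range_succ, List.foldl_append, List.foldl_cons, List.foldl_nil,
      ih (by omega)]
    exact pvB_step_eq l k (by omega)

-- ===== VERDICT (by name: the statement is the Claim_ definition above) =====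
theorem decode_majsoul_paipu_uuid_py_spec : Claim_equal_decode_majsoul_paipu_uuid_py := by
  intro uuid _
  unfold Spec_decode_majsoul_paipu_uuid_py decode_majsoul_paipu_uuid_py decode_majsoul_paipu_uuid_py_alt
  rw [pvA_eq_mapIdx, pvB_fold_inv _ 36 le_rfl]
  congr 1
  have hfun : (fun (i : Nat) (c : Char) => if i % 36 < 36 then pvF i c else c) = pvF := by
    funext i c
    rw [if_pos (Nat.mod_lt _ (by norm_num))]
  rw [hfun]
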